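-- pv_equiv track=rewrite | github.com/jsnjuan/Competitive-Programming | Google'sCodingCompetitions/CodeJam/2019/QualificationRound/YouCanGoYourOwnWay_5_9pts.py | gen_edges_restricted
-- ===== SOURCE A (Python) =====
-- def gen_edges_restricted(P):
--     st = set()
--     ini = 0, 0
--     for movement in P:
--         if movement == 'S':
--             nxt = tuple(map(lambda x, y: x + y, ini, (1, 0)))
--         else:
--             nxt = tuple(map(lambda x, y: x + y, ini, (0, 1)))
--         st.add((ini, nxt))
--         ini = nxt
--     return st
-- ===== SOURCE B (Python) =====
-- def gen_edges_restricted(P):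
--     def go(lo, hi, x, y):
--         # edges of the sub-path P[lo:hi] starting at position (x, y)
--         if hi - lo == 0:
--             return set()
--         if hi - lo == 1:
--             nxt = (x + 1, y) if P[lo] == 'S' else (x, y + 1)
--             return {((x, y), nxt)}
--         mid = (lo + hi) // 2
--         s = P.count('S', lo, mid)
--         return go(lo, mid, x, y) | go(mid, hi, x + s, y + (mid - lo - s))
--     return go(0, len(P), 0, 0)
-- ===== Notes on version B (the rewrite author's own statement) =====
-- stated objective: alternative
-- what changed: Replaces A's single left-to-right loop that walks the current position through the string by a divide-and-conquer recursion: the string is split in half, the midpoint position is computed directly by counting 'S' in the left half (no walking), and the two halves' edge sets are built independently and unioned.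
import Mathlib
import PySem

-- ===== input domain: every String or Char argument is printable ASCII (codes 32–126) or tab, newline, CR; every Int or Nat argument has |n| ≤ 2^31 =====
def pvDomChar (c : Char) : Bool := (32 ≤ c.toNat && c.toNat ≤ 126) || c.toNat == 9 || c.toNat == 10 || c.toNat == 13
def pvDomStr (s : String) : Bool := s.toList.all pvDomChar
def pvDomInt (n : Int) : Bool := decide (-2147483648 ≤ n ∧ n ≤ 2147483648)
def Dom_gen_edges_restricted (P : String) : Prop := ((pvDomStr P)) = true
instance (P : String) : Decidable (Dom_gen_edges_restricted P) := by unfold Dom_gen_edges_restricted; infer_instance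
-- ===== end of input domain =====

-- B replaces A's single position-walking loop by a divide-and-conquer recursion: split the string in half, jump to the midpoint position by counting 'S' in the left half, build and union the halves' edge sets; alternative decomposition, same result.


-- ===== PORT A =====
-- literal port of A: one loop carrying (st, ini); each step computes nxt and adds the edge
def gen_edges_restricted (P : String) : List ((Int × Int) × (Int × Int)) :=
  (P.toList.foldl
    (fun (acc : PySem.Set ((Int × Int) × (Int × Int)) × (Int × Int)) movement =>
      let ini := acc.2
      let nxt := if movement = 'S' then (ini.1 + 1, ini.2 + 0) else (ini.1 + 0, ini.2 + 1)
      (PySem.Set.add acc.1 (ini, nxt), nxt))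
    (PySem.Set.empty, ((0 : Int), (0 : Int)))).1

-- ===== PORT B =====
-- literal port of B's inner divide-and-conquer 'go': edges of P[lo:hi] starting at (x, y);
-- P.count('S', lo, mid) is ported as List.count on the slice (exact for a single character)
def pvGo (cs : List Char) (lo hi : Nat) (x y : Int) : PySem.Set ((Int × Int) × (Int × Int)) :=
  if hi - lo = 0 then PySem.Set.empty
  else if hi - lo = 1 then
    PySem.Set.add PySem.Set.empty
      ((x, y), if cs.getD lo ' ' = 'S' then (x + 1, y) else (x, y + 1))
  else
    PySem.Set.union (pvGo cs lo ((lo + hi) / 2) x y)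
      (pvGo cs ((lo + hi) / 2) hi
        (x + ((PySem.List.slice cs (some (lo : Int)) (some ((((lo + hi) / 2 : Nat)) : Int))).count 'S' : Int))
        (y + (((((lo + hi) / 2 : Nat)) : Int) - (lo : Int)
          - ((PySem.List.slice cs (some (lo : Int)) (some ((((lo + hi) / 2 : Nat)) : Int))).count 'S' : Int))))
termination_by hi - lo
decreasing_by all_goals omega

def gen_edges_restricted_alt (P : String) : List ((Int × Int) × (Int × Int)) :=
  pvGo P.toList 0 P.toList.length 0 0

-- ===== PRECONDITION & SPEC =====
def Spec_gen_edges_restricted (P : String) (out : List ((Int × Int) × (Int × Int))) : Prop := out = gen_edges_restricted_alt P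
instance (P : String) (out : List ((Int × Int) × (Int × Int))) : Decidable (Spec_gen_edges_restricted P out) := by unfold Spec_gen_edges_restricted; infer_instance

-- ===== CLAIM (what is proved, stated in full; the proofs are below) =====
def Claim_equal_gen_edges_restricted : Prop := ∀ (P : String), Dom_gen_edges_restricted P → Spec_gen_edges_restricted P (gen_edges_restricted P)

-- ===== LEMMAS AND PROOFS =====

-- the sequence of path edges from position p along character list cs (clean form)
def pvEdges : List Char → (Int × Int) → List ((Int × Int) × (Int × Int))
  | [], _ => []
  | c :: cs, p =>
    let n := if c = 'S' then (p.1 + 1, p.2) else (p.1, p.2 + 1)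
    (p, n) :: pvEdges cs n

-- same sequence written exactly as A computes the steps (with the + 0 terms)
def pvEdgesA : List Char → (Int × Int) → List ((Int × Int) × (Int × Int))
  | [], _ => []
  | c :: cs, p =>
    let n := if c = 'S' then (p.1 + 1, p.2 + 0) else (p.1 + 0, p.2 + 1)
    (p, n) :: pvEdgesA cs n

theorem pvEdgesA_eq (cs : List Char) (p : Int × Int) : pvEdgesA cs p = pvEdges cs p := by
  induction cs generalizing p with
  | nil => rfl
  | cons c cs ih =>
    by_cases h : c = 'S' <;> simp [pvEdgesA, pvEdges, h, ih]

theorem pvLoopA_eq (cs : List Char) (st : PySem.Set ((Int × Int) × (Int × Int))) (p : Int × Int) :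
    (cs.foldl
      (fun (acc : PySem.Set ((Int × Int) × (Int × Int)) × (Int × Int)) movement =>
        let ini := acc.2
        let nxt := if movement = 'S' then (ini.1 + 1, ini.2 + 0) else (ini.1 + 0, ini.2 + 1)
        (PySem.Set.add acc.1 (ini, nxt), nxt)) (st, p)).1
      = List.foldl PySem.Set.add st (pvEdgesA cs p) := by
  induction cs generalizing st p with
  | nil => simp [pvEdgesA]
  | cons c cs ih =>
    simp only [List.foldl_cons, pvEdgesA]
    exact ih _ _

-- every edge's coordinate sum lies in [p.1+p.2, p.1+p.2+len)
theorem pvEdges_sum_bounds (cs : List Char) (p : Int × Int)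
    (e : (Int × Int) × (Int × Int)) (he : e ∈ pvEdges cs p) :
    p.1 + p.2 ≤ e.1.1 + e.1.2 ∧ e.1.1 + e.1.2 < p.1 + p.2 + cs.length := by
  induction cs generalizing p with
  | nil => simp [pvEdges] at he
  | cons c cs ih =>
    simp only [pvEdges, List.mem_cons] at he
    rcases he with he | he
    · subst he
      dsimp only
      constructor
      · omega
      · simp only [List.length_cons]
        push_cast
        omega
    · by_cases h : c = 'S'
      · rw [if_pos h] at he
        have H := ih (p.1 + 1, p.2) he
        simp only [List.length_cons] at H ⊢
        push_cast at H ⊢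
        omega
      · rw [if_neg h] at he
        have H := ih (p.1, p.2 + 1) he
        simp only [List.length_cons] at H ⊢
        push_cast at H ⊢
        omega

theorem pvEdges_pairwise (cs : List Char) (p : Int × Int) :
    (pvEdges cs p).Pairwise (fun a b => a.1.1 + a.1.2 < b.1.1 + b.1.2) := by
  induction cs generalizing p with
  | nil => simp [pvEdges]
  | cons c cs ih =>
    simp only [pvEdges]
    refine List.Pairwise.cons ?_ (ih _)
    intro e he
    by_cases h : c = 'S'
    · rw [if_pos h] at he ⊢
      have H := (pvEdges_sum_bounds _ _ _ he).1
      dsimp only at H ⊢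
      omega
    · rw [if_neg h] at he ⊢
      have H := (pvEdges_sum_bounds _ _ _ he).1
      dsimp only at H ⊢
      omega

theorem pvEdges_nodup (cs : List Char) (p : Int × Int) : (pvEdges cs p).Nodup := by
  refine (pvEdges_pairwise cs p).imp ?_
  intro a b hlt heq
  subst heq
  omega

-- the end position of a segment is its start plus ('S'-count, length − 'S'-count)
theorem pvEdges_append (u v : List Char) (p : Int × Int) :
    pvEdges (u ++ v) p =
      pvEdges u p ++ pvEdges v (p.1 + (u.count 'S' : Int), p.2 + ((u.length : Int) - (u.count 'S' : Int))) := by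
  induction u generalizing p with
  | nil => simp [pvEdges]
  | cons c u ih =>
    simp only [List.cons_append, pvEdges]
    by_cases h : c = 'S'
    · subst h
      rw [if_pos rfl]
      congr 1
      rw [ih]
      congr 1
      simp only [List.count_cons_self, List.length_cons]
      exact congrArg (pvEdges v) (by simp only [Prod.mk.injEq]; constructor <;> (push_cast; ring))
    · rw [if_neg h]
      congr 1
      rw [ih]
      congr 1
      simp only [List.count_cons, List.length_cons, beq_iff_eq, h, if_false, add_zero]
      apply congrArg (pvEdges v)
      rw [Prod.ext_iff]
      refine ⟨rfl, ?_⟩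
      push_cast
      ring

-- B's divide-and-conquer computes exactly the edge sequence of the segment
theorem pvGo_eq (cs : List Char) (lo hi : Nat) (hle : lo ≤ hi) (hhi : hi ≤ cs.length)
    (x y : Int) :
    pvGo cs lo hi x y = pvEdges ((cs.drop lo).take (hi - lo)) (x, y) := by
  generalize hn : hi - lo = n
  induction n using Nat.strong_induction_on generalizing lo hi x y with
  | _ n ih =>
    rw [← hn, pvGo]
    by_cases h0 : hi - lo = 0
    · simp [h0, pvEdges, PySem.Set.empty]
    · by_cases h1 : hi - lo = 1
      · have hlt : lo < cs.length := by omega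
        have hone : (cs.drop lo).take (hi - lo) = [cs.getD lo ' '] := by
          rw [h1]
          rw [List.getD_eq_getElem?_getD, List.getElem?_eq_getElem hlt]
          rw [List.take_one, List.head?_drop, List.getElem?_eq_getElem hlt]
          rfl
        rw [if_neg h0, if_pos h1, hone]
        by_cases h : cs.getD lo ' ' = 'S' <;>
          simp [h, pvEdges, PySem.Set.add, PySem.Set.empty, PySem.Set.contains]
      · rw [if_neg h0, if_neg h1]
        have hmidlo : lo < (lo + hi) / 2 := by omega
        have hmidhi : (lo + hi) / 2 < hi := by omega
        have hmidle : (lo + hi) / 2 ≤ cs.length := le_trans (le_of_lt hmidhi) hhi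
        have hslice : PySem.List.slice cs (some (lo : Int)) (some (((lo + hi) / 2 : Nat) : Int))
            = (cs.drop lo).take ((lo + hi) / 2 - lo) := PySem.List.slice_natCast cs lo ((lo + hi) / 2)
        have hsplit : (cs.drop lo).take (hi - lo)
            = (cs.drop lo).take ((lo + hi) / 2 - lo) ++ (cs.drop ((lo + hi) / 2)).take (hi - (lo + hi) / 2) := by
          have h2 : hi - lo = ((lo + hi) / 2 - lo) + (hi - (lo + hi) / 2) := by omega
          have h3 : lo + ((lo + hi) / 2 - lo) = (lo + hi) / 2 := by omega
          rw [h2, List.take_add, List.drop_drop, h3]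
        have hulen : ((cs.drop lo).take ((lo + hi) / 2 - lo)).length = (lo + hi) / 2 - lo := by
          rw [List.length_take, List.length_drop]
          omega
        rw [hslice, hsplit, pvEdges_append]
        have hA := ih ((lo + hi) / 2 - lo) (by omega) lo ((lo + hi) / 2)
          (by omega) hmidle x y rfl
        have hB := ih (hi - (lo + hi) / 2) (by omega) ((lo + hi) / 2) hi
          (by omega) hhi
          (x + (((cs.drop lo).take ((lo + hi) / 2 - lo)).count 'S' : Int))
          (y + (((((lo + hi) / 2 : Nat)) : Int) - (lo : Int)
            - (((cs.drop lo).take ((lo + hi) / 2 - lo)).count 'S' : Int))) rfl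
        rw [hA, hB]
        have hy : (y + (((((lo + hi) / 2 : Nat)) : Int) - (lo : Int)
              - (((cs.drop lo).take ((lo + hi) / 2 - lo)).count 'S' : Int)))
            = y + ((((cs.drop lo).take ((lo + hi) / 2 - lo)).length : Int)
              - (((cs.drop lo).take ((lo + hi) / 2 - lo)).count 'S' : Int)) := by
          rw [hulen]
          push_cast [Nat.cast_sub (le_of_lt hmidlo)]
          ring
        rw [hy]
        -- the union of the two halves' edge sets is their concatenation (disjoint, nodup)
        unfold PySem.Set.union
        apply PySem.Set.update_eq_append_of_disjoint
        · exact pvEdges_nodup _ _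
        · intro e hev heu
          have hb1 := pvEdges_sum_bounds _ _ _ heu
          have hb2 := pvEdges_sum_bounds _ _ _ hev
          dsimp only at hb1 hb2
          rw [hulen] at hb1
          omega

-- ===== VERDICT (by name: the statement is the Claim_ definition above) =====
theorem gen_edges_restricted_spec : Claim_equal_gen_edges_restricted := by
  intro P _
  show gen_edges_restricted P = gen_edges_restricted_alt P
  unfold gen_edges_restricted gen_edges_restricted_alt
  rw [pvLoopA_eq, pvEdgesA_eq, pvGo_eq P.toList 0 P.toList.length (Nat.zero_le _) (le_refl _)]
  rw [List.drop_zero, Nat.sub_zero, List.take_length]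
  rw [show (List.foldl PySem.Set.add PySem.Set.empty (pvEdges P.toList (0, 0)))
      = PySem.Set.ofList (pvEdges P.toList (0, 0)) from (PySem.Set.ofList_eq_foldl _).symm]
  exact PySem.Set.ofList_eq_self_of_nodup _ (pvEdges_nodup _ _)
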